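-- pv_equiv track=rewrite | github.com/highlaw00/BaekJoon-Studies | 프로그래머스/2/138476. 귤 고르기/귤 고르기.py | solution
-- ===== SOURCE A (Python) =====
-- def solution(k, tangerine):
--     answer = 0
--
--     tangerine_map = dict()
--     for size in tangerine:
--         if size in tangerine_map:
--             tangerine_map[size] += 1
--         else:
--             tangerine_map[size] = 1
--
--     desc_tangerine = sorted(list(tangerine_map.values()), key = lambda x: -x)
--     current_tangerine_cnt = 0
--
--     while current_tangerine_cnt < k:
--         current_tangerine_cnt += desc_tangerine[answer]
--         answer += 1
--
--     return answer
-- ===== SOURCE B (Python) =====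
-- def solution(k, tangerine):
--     counts = {}
--     for size in tangerine:
--         counts[size] = counts.get(size, 0) + 1
--     n = len(tangerine)
--     bucket = [0] * (n + 1)
--     for c in counts.values():
--         bucket[c] += 1
--     answer = 0
--     remaining = k
--     for c in range(n, 0, -1):
--         if remaining <= 0:
--             break
--         m = bucket[c]
--         need = -(-remaining // c)
--         take = m if m < need else need
--         answer += take
--         remaining -= take * c
--     return answer
-- ===== Notes on version B (the rewrite author's own statement) =====
-- stated objective: alternative
-- what changed: replaces sorting the frequency list by a counting-sort bucket over frequency values with a greedy countdown scan that takes each whole bucket of equal frequencies in one ceil-division step (O(n) arithmetic ops instead of a comparison sort, though not measurably faster in CPython)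
import Mathlib
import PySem

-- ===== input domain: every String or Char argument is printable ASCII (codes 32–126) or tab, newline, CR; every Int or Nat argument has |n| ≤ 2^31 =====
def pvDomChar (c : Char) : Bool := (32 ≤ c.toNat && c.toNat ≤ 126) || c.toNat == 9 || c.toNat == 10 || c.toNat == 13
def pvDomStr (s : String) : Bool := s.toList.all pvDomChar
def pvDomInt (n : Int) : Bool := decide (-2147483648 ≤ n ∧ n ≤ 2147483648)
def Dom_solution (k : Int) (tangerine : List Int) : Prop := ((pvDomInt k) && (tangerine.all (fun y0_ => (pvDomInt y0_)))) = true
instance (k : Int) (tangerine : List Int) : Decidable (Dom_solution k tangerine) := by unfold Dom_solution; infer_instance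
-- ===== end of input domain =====

-- B replaces sorting the frequency list by a counting-sort bucket over frequency values with a
-- chunked greedy countdown scan (one ceil-division step per distinct frequency).

-- ===== PORT A =====
-- the 'while current_tangerine_cnt < k' loop; indexing desc_tangerine[answer] walks the list
-- front to back, so it is transcribed as structural recursion on the unread suffix.
-- In the [] case with current < k Python raises IndexError (excluded by Pre_); 0 is a junk value.
def solutionLoop (k : Int) : List Int → Int → Int → Int
  | [], current, _ans => if current < k then 0 else _ans
  | v :: rest, current, ans =>
      if current < k then solutionLoop k rest (current + v) (ans + 1) else ans

def solution (k : Int) (tangerine : List Int) : Int :=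
  let tangerineMap := tangerine.foldl
    (fun d size => if d.contains size then d.insert size (d.getD size 0 + 1) else d.insert size 1)
    PySem.Dict.empty
  let descTangerine := PySem.List.sorted tangerineMap.values (fun x => -x) false
  solutionLoop k descTangerine 0 0

-- ===== PORT B =====
-- 'for c in range(n, 0, -1): …' with an early break when remaining <= 0
def solutionAltLoop (bucket : List Int) : List Int → Int → Int → Int
  | [], _rem, ans => ans
  | c :: cs, rem, ans =>
      if rem ≤ 0 then ans
      else
        let m := PySem.List.pyGetD bucket c 0
        let need := -(PySem.Int.floordiv (-rem) c)
        let take := if m < need then m else need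
        solutionAltLoop bucket cs (rem - take * c) (ans + take)

def solution_alt (k : Int) (tangerine : List Int) : Int :=
  let counts := tangerine.foldl
    (fun d size => d.insert size (d.getD size 0 + 1)) PySem.Dict.empty
  let n : Int := PySem.List.len tangerine
  let bucket := counts.values.foldl
    (fun b c => PySem.List.pySetD b c (PySem.List.pyGetD b c 0 + 1))
    (List.replicate (n + 1).toNat 0)
  solutionAltLoop bucket (PySem.List.pyRange n 0 (-1)) k 0

-- ===== PRECONDITION & SPEC =====
-- A raises IndexError exactly when k exceeds the total number of tangerines.
def Pre_solution (k : Int) (tangerine : List Int) : Prop := k ≤ (tangerine.length : Int)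
instance (k : Int) (tangerine : List Int) : Decidable (Pre_solution k tangerine) := by unfold Pre_solution; infer_instance
def pvWitness_solution : Int × List Int := (2, [1, 1, 2])

def Spec_solution (k : Int) (tangerine : List Int) (out : Int) : Prop := out = solution_alt k tangerine
instance (k : Int) (tangerine : List Int) (out : Int) : Decidable (Spec_solution k tangerine out) := by unfold Spec_solution; infer_instance

-- ===== CLAIM (what is proved, stated in full; the proofs are below) =====
def Claim_equal_solution : Prop := ∀ (k : Int) (tangerine : List Int), Dom_solution k tangerine → Pre_solution k tangerine → Spec_solution k tangerine (solution k tangerine)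

-- ===== LEMMAS AND PROOFS =====

def pvVals (tg : List Int) : List Int := (PySem.Set.ofList tg).map (fun s => (tg.count s : Int))

def pvBlocks (tg : List Int) (R : List Int) : List Int :=
  R.flatMap (fun c => List.replicate ((pvVals tg).count c) c)

theorem pvVals_mem {tg x} (hx : x ∈ pvVals tg) : 1 ≤ x ∧ x ≤ (tg.length : Int) := by
  unfold pvVals at hx
  obtain ⟨s, hs, rfl⟩ := List.mem_map.mp hx
  have hmem : s ∈ tg := (PySem.Set.mem_ofList _ _).mp hs
  have h1 : 1 ≤ tg.count s := List.one_le_count_iff.mpr hmem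
  have h2 : tg.count s ≤ tg.length := List.count_le_length
  constructor <;> exact_mod_cast ‹_›

theorem pvVals_sum (tg : List Int) : (pvVals tg).sum = (tg.length : Int) := by
  unfold pvVals
  have hperm : (PySem.Set.ofList tg).Perm tg.dedup := by
    refine (List.perm_ext_iff_of_nodup (PySem.Set.nodup_ofList tg) tg.nodup_dedup).mpr ?_
    intro a; rw [PySem.Set.mem_ofList, List.mem_dedup]
  have := (hperm.map (fun s => (tg.count s : Int))).sum_eq
  rw [this]
  have h2 : (tg.dedup.map (fun s => tg.count s)).sum = tg.length :=
    List.sum_map_count_dedup_eq_length tg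
  have : (tg.dedup.map (fun s => (tg.count s : Int))).sum
      = ((tg.dedup.map (fun s => tg.count s)).sum : Int) := by
    rw [Nat.cast_list_sum, List.map_map]; rfl
  rw [this, h2]

theorem pvDict_eq (tg : List Int) :
    tg.foldl (fun d size => if d.contains size then d.insert size (d.getD size 0 + 1) else d.insert size 1)
      PySem.Dict.empty = PySem.Dict.counter tg := by
  rw [← PySem.Dict.foldl_insert_getD_add_one_eq_counter]
  apply PySem.List.foldl_congr_mem
  intro d x _
  by_cases h : d.contains x
  · simp [h]
  · simp only [Bool.not_eq_true] at h
    simp [h, PySem.Dict.getD_of_not_contains d 0 h]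

theorem pvValues_counter (tg : List Int) : (PySem.Dict.counter tg).values = pvVals tg := by
  rw [PySem.Dict.values_eq_map_keys _ (PySem.Dict.nodup_keys_counter tg) 0, PySem.Dict.keys_counter]
  unfold pvVals
  apply List.map_congr_left
  intro s _
  exact PySem.Dict.getD_counter tg s

theorem pvBlocks_count (tg : List Int) (R : List Int) (hR : R.Nodup) (x : Int) :
    (pvBlocks tg R).count x = if x ∈ R then (pvVals tg).count x else 0 := by
  induction R with
  | nil => simp [pvBlocks]
  | cons c R ih =>
    have hc : c ∉ R := (List.nodup_cons.mp hR).1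
    have ih' := ih (List.nodup_cons.mp hR).2
    simp only [pvBlocks, List.flatMap_cons, List.count_append] at *
    rw [ih', List.count_replicate]
    by_cases hx : x = c
    · subst hx
      simp [hc]
    · simp [hx, Ne.symm hx]

theorem pvBlocks_mem {tg R x} (hx : x ∈ pvBlocks tg R) : x ∈ R := by
  obtain ⟨c, hc, hrep⟩ := List.mem_flatMap.mp hx
  rwa [List.eq_of_mem_replicate hrep]

theorem pvBlocks_perm (tg : List Int) :
    (pvBlocks tg (PySem.List.pyRange (tg.length : Int) 0 (-1))).Perm (pvVals tg) := by
  have hnd : (PySem.List.pyRange (tg.length : Int) 0 (-1)).Nodup := by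
    rw [PySem.List.pyRange_neg_one_eq_reverse]
    exact (List.nodup_reverse).mpr (PySem.List.nodup_pyRange_one _ _)
  refine (List.perm_iff_count).mpr ?_
  intro x
  rw [pvBlocks_count tg _ hnd x]
  by_cases hx : x ∈ PySem.List.pyRange (tg.length : Int) 0 (-1)
  · simp [hx]
  · simp only [hx, if_false]
    symm
    rw [List.count_eq_zero]
    intro hmem
    exact hx (PySem.List.mem_pyRange_neg_one.mpr ⟨(pvVals_mem hmem).1.trans_lt' (by omega), (pvVals_mem hmem).2⟩)

theorem pvBlocks_sorted (tg : List Int) (R : List Int) (hR : R.Pairwise (· > ·)) :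
    (pvBlocks tg R).Pairwise (fun a b => b ≤ a) := by
  induction R with
  | nil => simp [pvBlocks]
  | cons c R ih =>
    rw [List.pairwise_cons] at hR
    simp only [pvBlocks, List.flatMap_cons]
    refine List.pairwise_append.mpr ⟨?_, ih hR.2, ?_⟩
    · exact List.pairwise_replicate.mpr (Or.inr (le_refl c))
    · intro a ha b hb
      rw [List.eq_of_mem_replicate ha]
      exact le_of_lt (hR.1 _ (pvBlocks_mem hb))

theorem pvDesc_eq (tg : List Int) :
    PySem.List.sorted (pvVals tg) (fun x => -x) false
      = pvBlocks tg (PySem.List.pyRange (tg.length : Int) 0 (-1)) := by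
  have hRp : (PySem.List.pyRange (tg.length : Int) 0 (-1)).Pairwise (· > ·) := by
    rw [PySem.List.pyRange_neg_one_eq_reverse, List.pairwise_reverse]
    exact PySem.List.pairwise_lt_pyRange_one _ _
  refine List.Perm.eq_of_pairwise (le := fun a b : Int => b ≤ a) ?_ ?_ ?_ ?_
  · intro a b _ _ h1 h2; omega
  · have := PySem.List.sorted_pairwise (pvVals tg) (fun x => -x)
    exact this.imp (by intro a b h; omega)
  · exact pvBlocks_sorted tg _ hRp
  · exact (PySem.List.sorted_perm _ _ _).trans (pvBlocks_perm tg).symm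

theorem pvBucket_getD (l : List Int) (b : List Int)
    (hl : ∀ x ∈ l, 0 ≤ x ∧ x < (b.length : Int)) (i : Int) (h0 : 0 ≤ i) (hi : i < (b.length : Int)) :
    PySem.List.pyGetD (l.foldl (fun b c => PySem.List.pySetD b c (PySem.List.pyGetD b c 0 + 1)) b) i 0
      = PySem.List.pyGetD b i 0 + (l.count i : Int) := by
  induction l generalizing b with
  | nil => simp
  | cons x l ih =>
    have hx := hl x (List.mem_cons_self)
    have hb' : (PySem.List.pySetD b x (PySem.List.pyGetD b x 0 + 1)).length = b.length :=
      PySem.List.length_pySetD b x _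
    rw [List.foldl_cons, ih _ (fun y hy => by rw [hb']; exact hl y (List.mem_cons_of_mem _ hy)) (by rw [hb']; exact hi)]
    have hxc : x = ((x.toNat : Nat) : Int) := by omega
    have hic : i = ((i.toNat : Nat) : Int) := by omega
    rw [hxc, hic, PySem.List.pyGetD_pySetD_natCast b x.toNat i.toNat _ 0 (by omega)]
    by_cases h : i.toNat = x.toNat
    · have : i = x := by omega
      simp [this]
      omega
    · have hne : ¬ i = x := by omega
      simp [h, List.count_cons]
      omega

theorem pvALoop_stop (k : Int) (l : List Int) (current ans : Int) (h : ¬ current < k) :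
    solutionLoop k l current ans = ans := by
  cases l <;> simp [solutionLoop, h]

theorem pvBLoop_stop (bucket R : List Int) (rem ans : Int) (h : rem ≤ 0) :
    solutionAltLoop bucket R rem ans = ans := by
  cases R <;> simp [solutionAltLoop, h]

theorem pvALoop_replicate (k c : Int) (hc : 0 < c) (m : Nat) :
    ∀ (current ans : Int) (rest : List Int),
    solutionLoop k (List.replicate m c ++ rest) current ans =
      if k - current ≤ 0 then ans
      else if k - current ≤ (m : Int) * c then ans + (-(PySem.Int.floordiv (-(k - current)) c))
      else solutionLoop k rest (current + (m : Int) * c) (ans + (m : Int)) := by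
  induction m with
  | zero =>
    intro current ans rest
    simp only [List.replicate_zero, List.nil_append, Nat.cast_zero, zero_mul, add_zero]
    by_cases h : k - current ≤ 0
    · rw [if_pos h, pvALoop_stop k rest current ans (by omega)]
    · rw [if_neg h, if_neg (by omega)]
  | succ m ih =>
    intro current ans rest
    rw [List.replicate_succ, List.cons_append]
    show (if current < k then solutionLoop k (List.replicate m c ++ rest) (current + c) (ans + 1) else ans) = _
    by_cases h : current < k
    · rw [if_pos h, ih (current + c) (ans + 1) rest,
        if_neg (show ¬ (k - current ≤ 0) by omega)]
      have hmc : (0:Int) ≤ (m : Int) * c := by positivity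
      by_cases h2 : k - (current + c) ≤ 0
      · rw [if_pos h2]
        have h1 : -(PySem.Int.floordiv (-(k - current)) c) = 1 :=
          (PySem.Int.neg_floordiv_neg_eq_iff_of_pos hc).mpr ⟨by omega, by omega⟩
        rw [if_pos (show k - current ≤ ((m + 1 : Nat) : Int) * c by push_cast; nlinarith), h1]
      · rw [if_neg h2]
        have hceil : -(PySem.Int.floordiv (-(k - current)) c)
            = -(PySem.Int.floordiv (-(k - (current + c))) c) + 1 := by
          have hq := (PySem.Int.neg_floordiv_neg_eq_iff_of_pos (a := k - (current + c)) (b := c) hc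
            (q := -(PySem.Int.floordiv (-(k - (current + c))) c))).mp rfl
          exact (PySem.Int.neg_floordiv_neg_eq_iff_of_pos hc).mpr ⟨by nlinarith [hq.1, hq.2], by nlinarith [hq.1, hq.2]⟩
        by_cases h3 : k - (current + c) ≤ (m : Int) * c
        · rw [if_pos h3,
            if_pos (show k - current ≤ ((m + 1 : Nat) : Int) * c by push_cast; nlinarith), hceil]
          ring
        · rw [if_neg h3,
            if_neg (show ¬ (k - current ≤ ((m + 1 : Nat) : Int) * c) by push_cast; nlinarith)]
          have e1 : current + c + (m : Int) * c = current + ((m + 1 : Nat) : Int) * c := by push_cast; ring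
          have e2 : ans + 1 + (m : Int) = ans + ((m + 1 : Nat) : Int) := by push_cast; ring
          rw [e1, e2]
    · rw [if_neg h, if_pos (show k - current ≤ 0 by omega)]

theorem pvLoop_main (k : Int) (tg : List Int) (bucket : List Int) :
    ∀ (R : List Int) (current ans : Int),
    (∀ c ∈ R, 0 < c ∧ PySem.List.pyGetD bucket c 0 = ((pvVals tg).count c : Int)) →
    k - current ≤ (pvBlocks tg R).sum →
    solutionLoop k (pvBlocks tg R) current ans = solutionAltLoop bucket R (k - current) ans := by
  intro R
  induction R with
  | nil =>
    intro current ans _ hsum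
    simp only [pvBlocks, List.flatMap_nil, List.sum_nil] at hsum ⊢
    rw [pvALoop_stop k [] current ans (by omega)]
    rfl
  | cons c R ih =>
    intro current ans hcR hsum
    obtain ⟨hcpos, hbuck⟩ := hcR c List.mem_cons_self
    have hrest := fun c' hc' => hcR c' (List.mem_cons_of_mem _ hc')
    have hsplit : pvBlocks tg (c :: R)
        = List.replicate ((pvVals tg).count c) c ++ pvBlocks tg R := by
      simp [pvBlocks]
    have hsum' : (pvBlocks tg (c :: R)).sum
        = ((pvVals tg).count c : Int) * c + (pvBlocks tg R).sum := by
      rw [hsplit, List.sum_append, List.sum_replicate, nsmul_eq_mul]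
    rw [hsplit, pvALoop_replicate k c hcpos _ current ans _]
    set m : Nat := (pvVals tg).count c with hm
    show _ = solutionAltLoop bucket (c :: R) (k - current) ans
    rw [show solutionAltLoop bucket (c :: R) (k - current) ans =
        (if k - current ≤ 0 then ans
         else
           let m' := PySem.List.pyGetD bucket c 0
           let need := -(PySem.Int.floordiv (-(k - current)) c)
           let take := if m' < need then m' else need
           solutionAltLoop bucket R (k - current - take * c) (ans + take)) from rfl]
    by_cases h0 : k - current ≤ 0
    · rw [if_pos h0, if_pos h0]
    · rw [if_neg h0, if_neg h0]
      simp only [hbuck]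
      set need := -(PySem.Int.floordiv (-(k - current)) c) with hneed
      have hq := (PySem.Int.neg_floordiv_neg_eq_iff_of_pos (a := k - current) (b := c) hcpos
        (q := need)).mp hneed.symm
      by_cases h1 : k - current ≤ (m : Int) * c
      · rw [if_pos h1]
        have hle : need ≤ (m : Int) := by nlinarith [hq.1, hq.2]
        rw [if_neg (show ¬ ((m : Int) < need) by omega)]
        rw [pvBLoop_stop bucket R _ _ (by nlinarith [hq.2])]
      · rw [if_neg h1]
        have hlt : (m : Int) < need := by nlinarith [hq.1, hq.2]
        rw [if_pos hlt]
        rw [ih (current + (m : Int) * c) (ans + (m : Int)) hrest (by rw [hsum'] at hsum; omega)]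
        congr 1
        omega

-- ===== VERDICT (by name: the statement is the Claim_ definition above) =====
theorem solution_spec : Claim_equal_solution := by
  intro k tg _ hpre
  unfold Spec_solution solution solution_alt
  simp only [PySem.List.len_eq]
  rw [pvDict_eq, pvValues_counter, pvDesc_eq,
    PySem.Dict.foldl_insert_getD_add_one_eq_counter, pvValues_counter]
  have hlen : (List.replicate ((tg.length : Int) + 1).toNat (0 : Int)).length = tg.length + 1 := by
    simp
  have hbuck : ∀ c ∈ PySem.List.pyRange (tg.length : Int) 0 (-1),
      0 < c ∧ PySem.List.pyGetD
        ((pvVals tg).foldl (fun b c => PySem.List.pySetD b c (PySem.List.pyGetD b c 0 + 1))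
          (List.replicate ((tg.length : Int) + 1).toNat 0)) c 0 = ((pvVals tg).count c : Int) := by
    intro c hcmem
    obtain h := PySem.List.mem_pyRange_neg_one.mp hcmem
    refine ⟨h.1, ?_⟩
    rw [pvBucket_getD (pvVals tg) _ ?hl c (by omega) (by rw [hlen]; push_cast; omega)]
    · rw [PySem.List.pyGetD_eq_getElem _ _ (by omega) (by rw [hlen]; push_cast; omega)]
      simp
    · intro x hx
      have := pvVals_mem hx
      rw [hlen]
      push_cast
      omega
  rw [pvLoop_main k tg _ (PySem.List.pyRange (tg.length : Int) 0 (-1)) 0 0 hbuck ?hs]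
  · norm_num
  · have : (pvBlocks tg (PySem.List.pyRange (tg.length : Int) 0 (-1))).sum = (pvVals tg).sum :=
      (pvBlocks_perm tg).sum_eq
    rw [this, pvVals_sum]
    unfold Pre_solution at hpre
    omega
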